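-- pv_equiv track=rewrite | github.com/sagikel/Wave-Editor | wave_editor.py | reduced_list
-- ===== SOURCE A (Python) =====
-- from copy import deepcopy
-- import math
--
-- def find_longer_lst(audio_lst1, audio_lst2):
--     """This function finds the longer list out of the audio lists."""
--     if len(audio_lst1) >= len(audio_lst2):
--         max_audio = audio_lst1
--     else:
--         max_audio = audio_lst2
--     return deepcopy(max_audio)
--
-- def divide_lst_helper(frame_rate1, frame_rate2, audio_lst1, audio_lst2):
--     """This function divides the longer audio list to smaller lists in the
--     size of (frame rate / gcd). All these smaller lists are in one long list.
--     This function excludes the modulo."""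
--     gcd = math.gcd(frame_rate1, frame_rate2)
--     max_num = int(max(frame_rate1, frame_rate2) / gcd)
--     new_lst = []
--     max_lst = find_longer_lst(audio_lst1, audio_lst2)
--     for i in range(int(len(max_lst)/max_num)):
--         new_lst.append([])    # create empty lists in the needed amount
--     start = 0
--     stop = max_num
--     while stop <= len(max_lst):
--         for i in range(len(new_lst)):
--             for j in range(start, stop):
--                 new_lst[i].append(list((max_lst[j])))
--             start += max_num
--             stop += max_num
--     return gcd, max_num, max_lst, new_lst
--
-- def divide_lst(frame_rate1, frame_rate2, audio_lst1, audio_lst2):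
--     """This function takes the list from the former function and adds a
--     list of the modulo."""
--     gcd, max_num, max_lst, new_lst = \
--         divide_lst_helper(frame_rate1, frame_rate2, audio_lst1, audio_lst2)
--     modulo = len(max_lst) % max_num
--     if modulo != 0:
--         new_lst.append([])
--
--     for j in range(modulo, 0, -1):
--         new_lst[-1].append(max_lst[-j])
--
--     return gcd, modulo, new_lst
--
-- def reduced_list(frame_rate1, frame_rate2, audio_lst1, audio_lst2):
--     """This function takes the needed amount of items from each inner list."""
--     gcd, modulo, lst = divide_lst(frame_rate1, frame_rate2,
--                                   audio_lst1, audio_lst2)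
--     min_num = int(min(frame_rate1, frame_rate2) / gcd)
--     new_lst = []
--     if modulo == 0:
--         for inner_lists in lst:
--             for j in range(min_num):
--                     new_lst.append(inner_lists[j])
--     else:
--         new_lst = modulo_not_zero(frame_rate1, frame_rate2,
--                                   audio_lst1, audio_lst2)
--     return new_lst
--
-- def modulo_not_zero(frame_rate1, frame_rate2, audio_lst1, audio_lst2):
--     """This function helps the former one when the modulo is not zero."""
--     gcd, modulo, lst = divide_lst(frame_rate1, frame_rate2,
--                                   audio_lst1, audio_lst2)
--     min_num = int(min(frame_rate1, frame_rate2) / gcd)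
--     new_lst = []
--     for inner_lists in lst[:-1]:
--         for j in range(min_num):
--             new_lst.append(inner_lists[j])
--     if modulo == 1:
--         new_lst.extend(lst[-1])
--     elif len(lst[-1]) < min_num:
--         new_lst.append(lst[-1])
--     else:
--         for j in range(min_num):
--             new_lst.append(lst[-1][j])
--     return new_lst
-- ===== SOURCE B (Python) =====
-- import math
--
-- def reduced_list(frame_rate1, frame_rate2, audio_lst1, audio_lst2):
--     """Subsample the longer audio list: from every chunk of max_num frames
--     keep the first min_num, in one direct pass with arithmetic indexing."""
--     g = math.gcd(frame_rate1, frame_rate2)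
--     mx = max(frame_rate1, frame_rate2) // g
--     mn = min(frame_rate1, frame_rate2) // g
--     src = audio_lst1 if len(audio_lst1) >= len(audio_lst2) else audio_lst2
--     out = []
--     for i in range(len(src) // mx):
--         for j in range(mn):
--             out.append(list(src[i * mx + j]))
--     m = len(src) % mx
--     if m != 0:
--         if m == 1:
--             out.append(list(src[-1]))
--         else:
--             for j in range(min(mn, m)):
--                 out.append(list(src[len(src) - m + j]))
--     return out
-- ===== Notes on version B (the rewrite author's own statement) =====
-- stated objective: simpler
-- what changed: A builds nested chunk lists through a four-helper pipeline (replicate empty slots, a while/for loop copying each chunk, a second pass appending the tail, then a third pass re-indexing every chunk); B computes gcd-derived chunk sizes and emits the kept frames in one direct pass with arithmetic indexing (i*mx+j), handling the leftover tail inline.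
-- outside the precondition, e.g. on reduced_list(111, 9, [[1], [6]], [[7, 6, 9]]): A returns [[[1], [6]]], B returns [[1], [6]]
import Mathlib
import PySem

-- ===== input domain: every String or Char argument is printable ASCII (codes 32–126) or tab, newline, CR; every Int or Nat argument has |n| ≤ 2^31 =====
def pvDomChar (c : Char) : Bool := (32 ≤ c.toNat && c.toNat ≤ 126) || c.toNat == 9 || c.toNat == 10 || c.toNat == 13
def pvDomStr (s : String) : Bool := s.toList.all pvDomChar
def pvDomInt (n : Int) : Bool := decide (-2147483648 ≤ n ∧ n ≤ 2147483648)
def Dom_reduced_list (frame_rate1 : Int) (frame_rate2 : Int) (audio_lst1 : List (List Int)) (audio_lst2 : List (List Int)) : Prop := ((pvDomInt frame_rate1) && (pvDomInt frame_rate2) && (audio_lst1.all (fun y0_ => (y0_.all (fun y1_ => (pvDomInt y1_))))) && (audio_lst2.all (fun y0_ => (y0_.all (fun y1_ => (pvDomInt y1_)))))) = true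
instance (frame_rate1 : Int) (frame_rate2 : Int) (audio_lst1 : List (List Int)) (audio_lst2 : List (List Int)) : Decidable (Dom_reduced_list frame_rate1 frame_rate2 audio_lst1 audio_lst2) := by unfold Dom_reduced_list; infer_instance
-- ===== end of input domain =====

-- B replaces A's four-helper pipeline (build nested chunk lists, then re-traverse them) by one
-- direct pass with arithmetic indexing (objective: simpler); the equivalence is about the return
-- value (neither program mutates its arguments; Python's list()/deepcopy copies are identity here).

-- ===== PORT A =====

-- deepcopy is the identity on immutable Lean values
def find_longer_lst (audio_lst1 : List (List Int)) (audio_lst2 : List (List Int)) : List (List Int) :=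
  if audio_lst1.length ≥ audio_lst2.length then audio_lst1 else audio_lst2

-- int(max(..)/gcd): on Dom the division is exact (gcd divides both rates) and |values| ≤ 2^31,
-- so the float division is exact and int() truncation is Int.tdiv; gcd = 0 raises in Python
-- (excluded by Pre_).  The Python 'while stop <= len(max_lst)' runs its body at most once when
-- max_num ≥ 1 (afterwards stop = max_num*(len(new_lst)+1) > len); when max_num ≤ 0 Python
-- diverges — those inputs are outside Pre_ — so the single guarded pass below is faithful.
def divide_lst_helper (frame_rate1 : Int) (frame_rate2 : Int) (audio_lst1 : List (List Int)) (audio_lst2 : List (List Int)) :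
    Int × Int × List (List Int) × List (List (List Int)) :=
  let gcd : Int := Int.gcd frame_rate1 frame_rate2
  let max_num : Int := (max frame_rate1 frame_rate2).tdiv gcd
  let max_lst := find_longer_lst audio_lst1 audio_lst2
  let new_lst : List (List (List Int)) :=
    List.replicate ((Int.tdiv (max_lst.length : Int) max_num).toNat) []
  let new_lst :=
    if max_num ≤ (max_lst.length : Int) then
      ((List.range new_lst.length).foldl
        (fun (s : List (List (List Int)) × Int × Int) (i : Nat) =>
          (s.1.set i ((s.1.getD i []) ++
              (PySem.List.pyRange s.2.1 s.2.2 1).map (fun j => PySem.List.pyGetD max_lst j [])),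
           s.2.1 + max_num, s.2.2 + max_num))
        (new_lst, 0, max_num)).1
    else new_lst
  (gcd, max_num, max_lst, new_lst)

def divide_lst (frame_rate1 : Int) (frame_rate2 : Int) (audio_lst1 : List (List Int)) (audio_lst2 : List (List Int)) :
    Int × Int × List (List (List Int)) :=
  let r := divide_lst_helper frame_rate1 frame_rate2 audio_lst1 audio_lst2
  let gcd := r.1
  let max_num := r.2.1
  let max_lst := r.2.2.1
  let new_lst := r.2.2.2
  let modulo := PySem.Int.mod (max_lst.length : Int) max_num
  let new_lst := if modulo ≠ 0 then new_lst ++ [[]] else new_lst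
  -- for j in range(modulo, 0, -1): new_lst[-1].append(max_lst[-j])   (indices in range under Pre_)
  let new_lst := (PySem.List.pyRange modulo 0 (-1)).foldl
    (fun nl j => nl.set (nl.length - 1)
        ((nl.getD (nl.length - 1) []) ++ [PySem.List.pyGetD max_lst (-j) []])) new_lst
  (gcd, modulo, new_lst)

def modulo_not_zero (frame_rate1 : Int) (frame_rate2 : Int) (audio_lst1 : List (List Int)) (audio_lst2 : List (List Int)) : List (List Int) :=
  let r := divide_lst frame_rate1 frame_rate2 audio_lst1 audio_lst2
  let gcd := r.1
  let modulo := r.2.1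
  let lst := r.2.2
  let min_num : Int := (min frame_rate1 frame_rate2).tdiv gcd
  let new_lst := (PySem.List.slice lst none (some (-1))).foldl
    (fun acc inner => acc ++ (PySem.List.pyRange 0 min_num 1).map
        (fun j => PySem.List.pyGetD inner j [])) []
  if modulo = 1 then new_lst ++ PySem.List.pyGetD lst (-1) []
  else if ((PySem.List.pyGetD lst (-1) []).length : Int) < min_num then
    -- Python appends lst[-1] itself here — a nested list, not a list-of-ints value; these
    -- inputs are excluded by Pre_; the port has to produce SOME value of the return type
    -- and appends lst[-1]'s elements instead (never reached inside Pre_)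
    new_lst ++ PySem.List.pyGetD lst (-1) []
  else new_lst ++ (PySem.List.pyRange 0 min_num 1).map
      (fun j => PySem.List.pyGetD (PySem.List.pyGetD lst (-1) []) j [])

def reduced_list (frame_rate1 : Int) (frame_rate2 : Int) (audio_lst1 : List (List Int)) (audio_lst2 : List (List Int)) : List (List Int) :=
  let r := divide_lst frame_rate1 frame_rate2 audio_lst1 audio_lst2
  let gcd := r.1
  let modulo := r.2.1
  let lst := r.2.2
  let min_num : Int := (min frame_rate1 frame_rate2).tdiv gcd
  if modulo = 0 then
    lst.foldl (fun acc inner => acc ++ (PySem.List.pyRange 0 min_num 1).map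
        (fun j => PySem.List.pyGetD inner j [])) []
  else modulo_not_zero frame_rate1 frame_rate2 audio_lst1 audio_lst2

-- ===== PORT B =====
def reduced_list_alt (frame_rate1 : Int) (frame_rate2 : Int) (audio_lst1 : List (List Int)) (audio_lst2 : List (List Int)) : List (List Int) :=
  let g : Int := Int.gcd frame_rate1 frame_rate2
  let mx := PySem.Int.floordiv (max frame_rate1 frame_rate2) g
  let mn := PySem.Int.floordiv (min frame_rate1 frame_rate2) g
  let src := if audio_lst1.length ≥ audio_lst2.length then audio_lst1 else audio_lst2
  let out := (PySem.List.pyRange 0 (PySem.Int.floordiv (src.length : Int) mx) 1).foldl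
    (fun acc i => acc ++ (PySem.List.pyRange 0 mn 1).map
        (fun j => PySem.List.pyGetD src (i * mx + j) [])) []
  let m := PySem.Int.mod (src.length : Int) mx
  if m ≠ 0 then
    if m = 1 then out ++ [PySem.List.pyGetD src (-1) []]
    else out ++ (PySem.List.pyRange 0 (min mn m) 1).map
        (fun j => PySem.List.pyGetD src ((src.length : Int) - m + j) [])
  else out

-- ===== PRECONDITION & SPEC =====
-- Pre_ excludes (a) inputs whose larger frame rate is ≤ 0, on which A never returns (both rates 0:
-- ZeroDivisionError; otherwise the while loop never terminates), and (b) inputs whose leftover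
-- chunk satisfies 1 < modulo < min_num, on which A appends the whole leftover chunk as ONE nested
-- element — not a list-of-ints value of the declared return type (B appends its elements flat).
def Pre_reduced_list (frame_rate1 : Int) (frame_rate2 : Int) (audio_lst1 : List (List Int)) (audio_lst2 : List (List Int)) : Prop :=
  0 < max frame_rate1 frame_rate2 ∧
  ¬ (1 < PySem.Int.mod (((if audio_lst1.length ≥ audio_lst2.length then audio_lst1 else audio_lst2).length : Nat) : Int)
        ((max frame_rate1 frame_rate2).tdiv (Int.gcd frame_rate1 frame_rate2)) ∧
     PySem.Int.mod (((if audio_lst1.length ≥ audio_lst2.length then audio_lst1 else audio_lst2).length : Nat) : Int)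
        ((max frame_rate1 frame_rate2).tdiv (Int.gcd frame_rate1 frame_rate2)) <
     (min frame_rate1 frame_rate2).tdiv (Int.gcd frame_rate1 frame_rate2))

instance (frame_rate1 : Int) (frame_rate2 : Int) (audio_lst1 : List (List Int)) (audio_lst2 : List (List Int)) : Decidable (Pre_reduced_list frame_rate1 frame_rate2 audio_lst1 audio_lst2) := by unfold Pre_reduced_list; infer_instance

def pvWitness_reduced_list : Int × Int × List (List Int) × List (List Int) :=
  (4, 6, [[1], [2], [3], [4], [5], [6], [7]], [[9]])

def Spec_reduced_list (frame_rate1 : Int) (frame_rate2 : Int) (audio_lst1 : List (List Int)) (audio_lst2 : List (List Int)) (out : List (List Int)) : Prop := out = reduced_list_alt frame_rate1 frame_rate2 audio_lst1 audio_lst2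
instance (frame_rate1 : Int) (frame_rate2 : Int) (audio_lst1 : List (List Int)) (audio_lst2 : List (List Int)) (out : List (List Int)) : Decidable (Spec_reduced_list frame_rate1 frame_rate2 audio_lst1 audio_lst2 out) := by unfold Spec_reduced_list; infer_instance

-- ===== CLAIM (what is proved, stated in full; the proofs are below) =====
def Claim_equal_reduced_list : Prop := ∀ (frame_rate1 : Int) (frame_rate2 : Int) (audio_lst1 : List (List Int)) (audio_lst2 : List (List Int)), Dom_reduced_list frame_rate1 frame_rate2 audio_lst1 audio_lst2 → Pre_reduced_list frame_rate1 frame_rate2 audio_lst1 audio_lst2 → Spec_reduced_list frame_rate1 frame_rate2 audio_lst1 audio_lst2 (reduced_list frame_rate1 frame_rate2 audio_lst1 audio_lst2)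

-- ===== LEMMAS AND PROOFS =====

theorem pv_getD_append_len {α : Type} (l : List α) (y : α) (t : List α) (d : α) :
    (l ++ y :: t).getD l.length d = y := by
  induction l with
  | nil => rfl
  | cons a l ih => simpa using ih

theorem pv_set_append_len {α : Type} (l : List α) (y : α) (t : List α) (v : α) :
    (l ++ y :: t).set l.length v = l ++ v :: t := by
  induction l with
  | nil => rfl
  | cons a l ih => simp [ih]


-- generic: [f(j) for j in range(0, c)] as a map over Nat range
theorem pv_mapRange0 {α : Type} (f : Int → α) (c : Int) :
    (PySem.List.pyRange 0 c 1).map f = (List.range c.toNat).map (fun (t : Nat) => f (t : Int)) := by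
  rw [PySem.List.pyRange_one]
  simp [List.map_map, Function.comp_def]

-- the inner while/for loop of divide_lst_helper: chunk i holds max_lst[max_num*i : max_num*(i+1)]
theorem pv_foldA (src : List (List Int)) (mx : Int) (rest : Nat) :
    ∀ (done : List (List (List Int))),
    ((List.range' done.length rest).foldl
      (fun (s : List (List (List Int)) × Int × Int) (i : Nat) =>
        (s.1.set i ((s.1.getD i []) ++
            (PySem.List.pyRange s.2.1 s.2.2 1).map (fun j => PySem.List.pyGetD src j [])),
         s.2.1 + mx, s.2.2 + mx))
      (done ++ List.replicate rest [], mx * done.length, mx * (done.length + 1))).1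
    = done ++ (List.range' done.length rest).map
        (fun (i : Nat) => (PySem.List.pyRange (mx * (i : Int)) (mx * ((i : Int) + 1)) 1).map
          (fun j => PySem.List.pyGetD src j [])) := by
  induction rest with
  | zero => intro done; simp
  | succ rest ih =>
    intro done
    rw [List.range'_succ, List.replicate_succ]
    simp only [List.foldl_cons]
    rw [pv_getD_append_len, pv_set_append_len]
    have harr : done ++ ([] ++ (PySem.List.pyRange (mx * ↑done.length) (mx * (↑done.length + 1)) 1).map
          (fun j => PySem.List.pyGetD src j [])) :: List.replicate rest [] =
        (done ++ [(PySem.List.pyRange (mx * ↑done.length) (mx * (↑done.length + 1)) 1).map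
          (fun j => PySem.List.pyGetD src j [])]) ++ List.replicate rest [] := by
      rw [List.nil_append, List.append_cons]
    rw [harr]
    have hlen : (done ++ [(PySem.List.pyRange (mx * ↑done.length) (mx * (↑done.length + 1)) 1).map
          (fun j => PySem.List.pyGetD src j [])]).length = done.length + 1 := by simp
    have hst : mx * ↑done.length + mx = mx * ((done.length + 1 : Nat) : Int) := by push_cast; ring
    have hsp : mx * (↑done.length + 1) + mx = mx * (((done.length + 1 : Nat) : Int) + 1) := by push_cast; ring
    rw [hst, hsp]
    have := ih (done ++ [(PySem.List.pyRange (mx * ↑done.length) (mx * (↑done.length + 1)) 1).map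
          (fun j => PySem.List.pyGetD src j [])])
    rw [hlen] at this
    push_cast at this ⊢
    rw [this]
    simp

-- the tail loop of divide_lst: appending max_lst[-j] for j = modulo..1 to the last (empty) slot
theorem pv_foldTail (src : List (List Int)) (js : List Int) :
    ∀ (front : List (List (List Int))) (acc : List (List Int)),
    js.foldl (fun nl j => nl.set (nl.length - 1)
        ((nl.getD (nl.length - 1) []) ++ [PySem.List.pyGetD src (-j) []]))
      (front ++ [acc])
    = front ++ [acc ++ js.map (fun j => PySem.List.pyGetD src (-j) [])] := by
  induction js with
  | nil => intro front acc; simp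
  | cons j js ih =>
    intro front acc
    simp only [List.foldl_cons, List.map_cons]
    have hlen : (front ++ [acc]).length - 1 = front.length := by simp
    rw [hlen, pv_getD_append_len, pv_set_append_len]
    have h2 : front ++ (acc ++ [PySem.List.pyGetD src (-j) []]) :: ([] : List (List (List Int))) =
        front ++ [acc ++ [PySem.List.pyGetD src (-j) []]] := rfl
    rw [h2, ih front (acc ++ [PySem.List.pyGetD src (-j) []])]
    simp

theorem pv_tailEq (src : List (List Int)) (m' : Nat) (h : m' ≤ src.length) :
    (PySem.List.pyRange (m' : Int) 0 (-1)).map (fun j => PySem.List.pyGetD src (-j) []) =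
    (List.range m').map (fun t => src.getD (src.length - m' + t) []) := by
  rw [PySem.List.pyRange_neg_one]
  simp only [List.map_map, Int.sub_zero, Int.toNat_natCast]
  apply List.map_congr_left
  intro t ht
  simp only [List.mem_range] at ht
  simp only [Function.comp_apply]
  have h1 : -((m' : Int) - (t : Int)) = -(((m' - t : Nat) : Int)) := by
    push_cast [Nat.cast_sub (le_of_lt ht)]; ring
  rw [h1, PySem.List.pyGetD_neg_natCast src (m' - t) [] (by omega) (by omega)]
  rw [← List.getD_eq_getElem src [] (by omega)]
  have h2 : src.length - (m' - t) = src.length - m' + t := by omega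
  rw [h2]

-- getD of a comprehension over range
theorem pv_getD_map_range (f : Nat → List Int) (m t : Nat) (h : t < m) :
    ((List.range m).map f).getD t [] = f t := by
  rw [List.getD_eq_getElem _ _ (by simpa using h)]
  simp

theorem reduced_list_spec : Claim_equal_reduced_list := by
  intro f1 f2 a1 a2 _ hpre
  unfold Spec_reduced_list
  obtain ⟨hmax, hmod⟩ := hpre
  have hgcd0 : Int.gcd f1 f2 ≠ 0 := by
    intro h
    obtain ⟨h1, h2⟩ := Int.gcd_eq_zero_iff.mp h
    rw [h1, h2] at hmax
    simp at hmax
  simp only [reduced_list, reduced_list_alt, modulo_not_zero, divide_lst, divide_lst_helper,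
    find_longer_lst] at hmod ⊢
  set g : Int := ((Int.gcd f1 f2 : Nat) : Int) with hgdef
  have hg : (0:Int) < g := by rw [hgdef]; exact_mod_cast Nat.pos_of_ne_zero hgcd0
  have hdvdmax : g ∣ max f1 f2 := by
    rcases max_choice f1 f2 with h | h <;> rw [h, hgdef]
    · exact Int.gcd_dvd_left f1 f2
    · exact Int.gcd_dvd_right f1 f2
  have hdvdmin : g ∣ min f1 f2 := by
    rcases min_choice f1 f2 with h | h <;> rw [h, hgdef]
    · exact Int.gcd_dvd_left f1 f2
    · exact Int.gcd_dvd_right f1 f2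
  set mx : Int := (max f1 f2).tdiv g with hmxdef
  set mn : Int := (min f1 f2).tdiv g with hmndef
  have hmx_ediv : mx = max f1 f2 / g := Int.tdiv_eq_ediv_of_dvd hdvdmax
  have hmn_ediv : mn = min f1 f2 / g := Int.tdiv_eq_ediv_of_dvd hdvdmin
  have hmxpos : 0 < mx := by
    obtain ⟨q, hq⟩ := hdvdmax
    have hqpos : 0 < q := by nlinarith [hq ▸ hmax]
    rw [hmx_ediv, hq, Int.mul_ediv_cancel_left _ (ne_of_gt hg)]
    exact hqpos
  have hmnle : mn ≤ mx := by
    rw [hmx_ediv, hmn_ediv]; exact Int.ediv_le_ediv hg min_le_max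
  set M : Nat := mx.toNat with hMdef
  have hMcast : (M : Int) = mx := Int.toNat_of_nonneg (le_of_lt hmxpos)
  have hM1 : 1 ≤ M := by omega
  set src := if a1.length ≥ a2.length then a1 else a2 with hsrcdef
  set n := src.length with hndef
  set k : Nat := n / M with hkdef
  set m' : Nat := n % M with hm'def
  have hm'len : m' ≤ n := Nat.mod_le n M
  have htdivn : (Int.tdiv (n : Int) mx).toNat = k := by
    rw [← hMcast, Int.tdiv_eq_ediv_of_nonneg (by positivity), ← Int.natCast_div]
    exact Int.toNat_natCast _
  have hmodn : PySem.Int.mod (n : Int) mx = ((m' : Nat) : Int) := by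
    rw [← hMcast, PySem.Int.mod_natCast]
  have hfdmax : PySem.Int.floordiv (max f1 f2) g = mx := by
    rw [PySem.Int.floordiv_eq_ediv_of_pos hg, ← hmx_ediv]
  have hfdmin : PySem.Int.floordiv (min f1 f2) g = mn := by
    rw [PySem.Int.floordiv_eq_ediv_of_pos hg, ← hmn_ediv]
  have hfdn : PySem.Int.floordiv (n : Int) mx = ((k : Nat) : Int) := by
    rw [← hMcast, PySem.Int.floordiv_eq_ediv_of_pos (by exact_mod_cast hM1), ← Int.natCast_div]
  have hmn'M : mn.toNat ≤ M := by omega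
  rw [hmodn] at hmod
  rw [hfdmax, hfdmin, hfdn, htdivn, hmodn]
  set chunksN : List (List (List Int)) :=
    (List.range k).map (fun i => (List.range M).map (fun u => src.getD (M*i+u) ([]:List Int)))
    with hchunksdef
  have hchunk_conv : ∀ i : Nat,
      (PySem.List.pyRange (mx * (i : Int)) (mx * ((i : Int) + 1)) 1).map
        (fun j => PySem.List.pyGetD src j []) =
      (List.range M).map (fun u => src.getD (M*i+u) ([]:List Int)) := by
    intro i
    rw [PySem.List.pyRange_one]
    have hlen : (mx * ((i : Int) + 1) - mx * (i : Int)).toNat = M := by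
      have h : mx * ((i : Int) + 1) - mx * (i : Int) = mx := by ring
      rw [h]
    rw [hlen]
    simp only [List.map_map]
    apply List.map_congr_left
    intro u _
    simp only [Function.comp_apply]
    have h2 : mx * (i : Int) + (u : Int) = (((M*i+u : Nat) : Nat) : Int) := by
      rw [← hMcast]; push_cast; ring
    rw [h2, PySem.List.pyGetD_natCast]
  have hfold : (if mx ≤ (n:Int) then
      (List.foldl (fun (s : List (List (List Int)) × Int × Int) (i : Nat) =>
        (s.1.set i ((s.1.getD i []) ++
            (PySem.List.pyRange s.2.1 s.2.2 1).map (fun j => PySem.List.pyGetD src j [])),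
         s.2.1 + mx, s.2.2 + mx))
        (List.replicate k [], 0, mx) (List.range (List.replicate k ([]:List (List Int))).length)).1
      else List.replicate k []) = chunksN := by
    by_cases hguard : mx ≤ (n:Int)
    · rw [if_pos hguard]
      have e := pv_foldA src mx k []
      simp only [List.length_nil, List.nil_append, Nat.cast_zero, mul_zero, zero_add, mul_one,
        ← List.range_eq_range'] at e
      simp only [List.length_replicate]
      rw [e, hchunksdef]
      exact List.map_congr_left (fun i _ => hchunk_conv i)
    · rw [if_neg hguard]
      have hk0 : k = 0 := by
        have hnM : n < M := by omega
        rw [hkdef]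
        exact Nat.div_eq_of_lt hnM
      rw [hchunksdef, hk0]
      simp
  rw [hfold]
  have hNFA : chunksN.foldl (fun acc inner => acc ++
        (PySem.List.pyRange 0 mn 1).map (fun j => PySem.List.pyGetD inner j [])) [] =
      (List.range k).flatMap (fun i => (List.range mn.toNat).map
        (fun t => src.getD (M*i+t) ([]:List Int))) := by
    rw [PySem.List.foldl_append_eq_flatMap, List.nil_append, hchunksdef, List.flatMap_map]
    congr 1
    funext i
    rw [pv_mapRange0]
    apply List.map_congr_left
    intro t ht
    simp only [List.mem_range] at ht
    rw [PySem.List.pyGetD_natCast, pv_getD_map_range _ _ _ (lt_of_lt_of_le ht hmn'M)]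
  have hNFB : (PySem.List.pyRange 0 ((k:Nat):Int) 1).foldl (fun acc i => acc ++
        (PySem.List.pyRange 0 mn 1).map (fun j => PySem.List.pyGetD src (i * mx + j) [])) [] =
      (List.range k).flatMap (fun i => (List.range mn.toNat).map
        (fun t => src.getD (M*i+t) ([]:List Int))) := by
    rw [PySem.List.foldl_append_eq_flatMap, List.nil_append, PySem.List.pyRange_zero_natCast,
      List.flatMap_map]
    congr 1
    funext i
    rw [pv_mapRange0]
    apply List.map_congr_left
    intro t _
    have hidx : ((i:Nat) : Int) * mx + ((t:Nat):Int) = (((M*i+t : Nat) : Nat) : Int) := by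
      rw [← hMcast]; push_cast; ring
    rw [hidx, PySem.List.pyGetD_natCast]
  by_cases hm0 : m' = 0
  · -- no leftover: both programs emit exactly the full-chunk selection
    simp only [hm0, Nat.cast_zero, PySem.List.pyRange_neg_one_eq_nil (le_refl (0:Int)),
      List.foldl_nil, ne_eq, not_true_eq_false, if_true, if_false]
    rw [hNFA, hNFB]
  · have hcne : ((m':Nat):Int) ≠ 0 := by exact_mod_cast hm0
    rw [if_pos hcne, if_neg hcne, if_pos hcne]
    rw [pv_foldTail src (PySem.List.pyRange ((m':Nat):Int) 0 (-1)) chunksN [], List.nil_append]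
    rw [pv_tailEq src m' hm'len]
    rw [PySem.List.slice_to_neg_one, List.dropLast_concat, PySem.List.pyGetD_neg_one_append_singleton]
    by_cases hm1 : m' = 1
    · -- leftover of exactly one element: both append it whole
      have hc1 : ((m':Nat):Int) = 1 := by rw [hm1]; exact Nat.cast_one
      rw [if_pos hc1, if_pos hc1]
      rw [hNFA, hNFB]
      have hb1 : PySem.List.pyGetD src (-1) ([]:List Int) = src.getD (src.length - 1) [] := by
        have hne : src ≠ [] := List.ne_nil_of_length_pos (by omega)
        rw [PySem.List.pyGetD_neg_ofNat src 1 [] (by omega) (by omega),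
          ← List.getD_eq_getElem src [] (by omega)]
      rw [hb1, hm1]
      simp
    · -- leftover of ≥ 2 elements: Pre_ gives min_num ≤ modulo, both take min_num of the tail
      have hmnlem : mn ≤ ((m':Nat):Int) := by omega
      have hc1ne : ((m':Nat):Int) ≠ 1 := by exact_mod_cast hm1
      rw [if_neg hc1ne, if_neg hc1ne]
      simp only [List.length_map, List.length_range]
      rw [if_neg (by omega : ¬ (((m':Nat):Int) < mn))]
      rw [min_eq_left hmnlem, hNFA, hNFB]
      congr 1
      rw [pv_mapRange0, pv_mapRange0]
      apply List.map_congr_left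
      intro t ht
      simp only [List.mem_range] at ht
      have hmn'm : mn.toNat ≤ m' := by omega
      have hidx2 : ((src.length:Nat) : Int) - ((m':Nat):Int) + ((t:Nat):Int) =
          (((src.length - m' + t : Nat) : Nat) : Int) := by omega
      rw [PySem.List.pyGetD_natCast, pv_getD_map_range _ _ _ (by omega)]
      rw [hidx2, PySem.List.pyGetD_natCast]
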